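-- pv_equiv track=rewrite | github.com/Bimagambet/PP2 | lab_6/built_in.py | sanau
-- ===== SOURCE A (Python) =====
-- def sanau(text):
--     up = 0
--     low = 0
--     for i in text:
--         if ord(i) > 96:
--             low += 1
--         else:
--             up += 1
--     return up, low
-- ===== SOURCE B (Python) =====
-- def sanau(text):
--     def go(lo, hi):
--         if hi - lo == 0:
--             return (0, 0)
--         if hi - lo == 1:
--             return (0, 1) if ord(text[lo]) > 96 else (1, 0)
--         mid = (lo + hi) // 2
--         u1, l1 = go(lo, mid)
--         u2, l2 = go(mid, hi)
--         return (u1 + u2, l1 + l2)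
--     return go(0, len(text))
-- ===== Notes on version B (the rewrite author's own statement) =====
-- stated objective: alternative
-- what changed: B replaces A's linear two-accumulator loop with a recursive divide-and-conquer: it splits the index range in half, counts each half recursively (base cases: empty range and single character), and sums the pair results.
import Mathlib
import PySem

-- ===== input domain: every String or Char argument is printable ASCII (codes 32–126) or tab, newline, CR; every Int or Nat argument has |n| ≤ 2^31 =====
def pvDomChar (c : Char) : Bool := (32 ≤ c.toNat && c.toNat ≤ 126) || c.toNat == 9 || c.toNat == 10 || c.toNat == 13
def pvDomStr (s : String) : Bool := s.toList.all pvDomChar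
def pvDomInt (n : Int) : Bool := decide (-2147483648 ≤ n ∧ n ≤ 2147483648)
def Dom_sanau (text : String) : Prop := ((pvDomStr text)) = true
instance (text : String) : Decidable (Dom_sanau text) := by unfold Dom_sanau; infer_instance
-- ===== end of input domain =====

-- B replaces A's linear two-accumulator loop with a recursive divide-and-conquer on halves (objective: alternative).
-- ===== PORT A =====
def sanau (text : String) : Int × Int :=
  text.toList.foldl (fun (st : Int × Int) i =>
    if i.toNat > 96 then (st.1, st.2 + 1) else (st.1 + 1, st.2)) (0, 0)

-- ===== PORT B =====
-- go(lo, hi) of Source B, on the sublist of characters of that range (take/drop mirror the halving).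
def sanauGo (l : List Char) : Int × Int :=
  match l with
  | [] => (0, 0)
  | [c] => if c.toNat > 96 then (0, 1) else (1, 0)
  | a :: b :: rest =>
    let mid := (a :: b :: rest).length / 2
    let p1 := sanauGo ((a :: b :: rest).take mid)
    let p2 := sanauGo ((a :: b :: rest).drop mid)
    (p1.1 + p2.1, p1.2 + p2.2)
  termination_by l.length
  decreasing_by
  · simp [List.length_take]; omega
  · simp [List.length_drop]; omega

def sanau_alt (text : String) : Int × Int := sanauGo text.toList

-- ===== PRECONDITION & SPEC =====
def Spec_sanau (text : String) (out : Int × Int) : Prop := out = sanau_alt text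
instance (text : String) (out : Int × Int) : Decidable (Spec_sanau text out) := by unfold Spec_sanau; infer_instance

-- ===== CLAIM (what is proved, stated in full; the proofs are below) =====
def Claim_equal_sanau : Prop := ∀ (text : String), Dom_sanau text → Spec_sanau text (sanau text)

-- ===== LEMMAS AND PROOFS =====
lemma sanau_loop (l : List Char) (u v : Int) :
    l.foldl (fun (st : Int × Int) i =>
      if i.toNat > 96 then (st.1, st.2 + 1) else (st.1 + 1, st.2)) (u, v)
    = (u + (l.countP (fun c => ¬ c.toNat > 96) : Int),
       v + (l.countP (fun c => c.toNat > 96) : Int)) := by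
  induction l generalizing u v with
  | nil => simp
  | cons c t ih =>
      simp only [List.foldl_cons, List.countP_cons]
      by_cases h : c.toNat > 96 <;> simp [h, ih] <;> ring_nf

lemma sanauGo_eq (l : List Char) :
    sanauGo l = ((l.countP (fun c => ¬ c.toNat > 96) : Int),
                 (l.countP (fun c => c.toNat > 96) : Int)) := by
  fun_induction sanauGo l with
  | case1 => simp
  | case2 c h => simp [h]
  | case3 c h => simp [h]
  | case4 a b rest mid p1 p2 ihTake ihDrop =>
      simp only [mid, p1, p2, ihTake, ihDrop]
      conv_rhs => rw [show a :: b :: rest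
        = (a :: b :: rest).take ((a :: b :: rest).length / 2)
          ++ (a :: b :: rest).drop ((a :: b :: rest).length / 2)
        from (List.take_append_drop _ _).symm]
      simp only [List.countP_append]
      push_cast
      ring_nf

-- ===== VERDICT (by name: the statement is the Claim_ definition above) =====
theorem sanau_spec : Claim_equal_sanau := by
  intro text _
  unfold Spec_sanau sanau sanau_alt
  rw [sanau_loop, sanauGo_eq]
  simp
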